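-- pv_equiv track=rewrite | github.com/Julian-Caleb/maimaidx-scoring-system | Scoring.py | TotalBasePointChart
-- ===== SOURCE A (Python) =====
-- def TotalBasePointChart(chart) :
--     basePoint = 0
--     for i in range (len(chart)) :
--         if (chart[i] == 'T') :
--             basePoint += 500
--         elif (chart[i] == 'HH') :
--             basePoint += 1000
--         elif (chart[i] == 'SSS') :
--             basePoint += 1500
--         elif (chart[i] == 'BBBB') :
--             basePoint += 2500
--     return basePoint
-- ===== SOURCE B (Python) =====
-- WEIGHTS = (('T', 500), ('HH', 1000), ('SSS', 1500), ('BBBB', 2500))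
--
-- def TotalBasePointChart(chart):
--     # Four staged list.count passes, one per scoring key; no per-element branching.
--     return sum(w * chart.count(k) for k, w in WEIGHTS)
-- ===== Notes on version B (the rewrite author's own statement) =====
-- stated objective: alternative
-- what changed: B makes four staged passes over the chart, one list.count scan per weight key, and sums weight*count, replacing A's single loop that branches on every position.
import Mathlib
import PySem

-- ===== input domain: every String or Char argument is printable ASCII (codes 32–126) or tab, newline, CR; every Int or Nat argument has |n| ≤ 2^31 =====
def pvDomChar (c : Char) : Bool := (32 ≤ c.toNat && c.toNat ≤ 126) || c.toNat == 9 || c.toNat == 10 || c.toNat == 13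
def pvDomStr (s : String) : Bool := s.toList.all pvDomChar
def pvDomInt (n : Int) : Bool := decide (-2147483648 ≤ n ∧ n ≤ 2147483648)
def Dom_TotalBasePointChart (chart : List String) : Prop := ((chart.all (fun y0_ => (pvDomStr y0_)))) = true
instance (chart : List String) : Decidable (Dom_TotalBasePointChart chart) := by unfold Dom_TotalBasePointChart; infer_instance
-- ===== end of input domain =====

-- B replaces A's per-position branching loop by four staged list.count scans
-- (one per weight key) summed with their weights; objective: alternative decomposition.

-- ===== PORT A =====
def TotalBasePointChart (chart : List String) : Int :=
  (PySem.List.pyRange 0 chart.length 1).foldl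
    (fun basePoint i =>
      if PySem.List.pyGetD chart i "" = "T" then basePoint + 500
      else if PySem.List.pyGetD chart i "" = "HH" then basePoint + 1000
      else if PySem.List.pyGetD chart i "" = "SSS" then basePoint + 1500
      else if PySem.List.pyGetD chart i "" = "BBBB" then basePoint + 2500
      else basePoint) 0

-- ===== PORT B =====
def pvWeights : List (String × Int) := [("T", 500), ("HH", 1000), ("SSS", 1500), ("BBBB", 2500)]

def TotalBasePointChart_alt (chart : List String) : Int :=
  (pvWeights.map (fun kw => kw.2 * (PySem.List.count chart kw.1 : Int))).sum

-- ===== PRECONDITION & SPEC =====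
def Spec_TotalBasePointChart (chart : List String) (out : Int) : Prop := out = TotalBasePointChart_alt chart
instance (chart : List String) (out : Int) : Decidable (Spec_TotalBasePointChart chart out) := by unfold Spec_TotalBasePointChart; infer_instance

-- ===== CLAIM =====
def Claim_equal_TotalBasePointChart : Prop := ∀ (chart : List String), Dom_TotalBasePointChart chart → Spec_TotalBasePointChart chart (TotalBasePointChart chart)

-- ===== LEMMAS AND PROOFS =====

-- A's loop, as a fold over the list, equals the weighted count sum.
theorem pvA_foldl_counts (chart : List String) (init : Int) :
    chart.foldl
      (fun basePoint x =>
        if x = "T" then basePoint + 500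
        else if x = "HH" then basePoint + 1000
        else if x = "SSS" then basePoint + 1500
        else if x = "BBBB" then basePoint + 2500
        else basePoint) init
    = init + 500 * chart.count "T" + 1000 * chart.count "HH"
        + 1500 * chart.count "SSS" + 2500 * chart.count "BBBB" := by
  induction chart generalizing init with
  | nil => simp
  | cons x xs ih =>
    simp only [List.foldl_cons, ih, List.count_cons]
    split_ifs <;> subst_eqs <;> simp [List.count_cons] <;> first | omega | simp_all

theorem pvB_eval (chart : List String) :
    TotalBasePointChart_alt chart
    = 0 + 500 * chart.count "T" + 1000 * chart.count "HH"
        + 1500 * chart.count "SSS" + 2500 * chart.count "BBBB" := by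
  simp only [TotalBasePointChart_alt, pvWeights, List.map_cons, List.map_nil,
    List.sum_cons, List.sum_nil, PySem.List.count_eq]
  ring

-- ===== VERDICT =====
theorem TotalBasePointChart_spec : Claim_equal_TotalBasePointChart := by
  intro chart _
  unfold Spec_TotalBasePointChart TotalBasePointChart
  rw [PySem.List.foldl_pyRange_zero_pyGetD' chart ""
    (fun basePoint x =>
      if x = "T" then basePoint + 500
      else if x = "HH" then basePoint + 1000
      else if x = "SSS" then basePoint + 1500
      else if x = "BBBB" then basePoint + 2500
      else basePoint) 0, pvA_foldl_counts, pvB_eval]
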